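-- pv_equiv track=rewrite | github.com/ChristerNilsson/2021 | 007-CodeForces-1000/1469B/1469B.py | f
-- ===== SOURCE A (Python) =====
-- def f(rs,bs):
--
-- 	x = 0
-- 	rbest = 0
-- 	for item in rs:
-- 		x += item
-- 		if x > rbest: rbest = x
--
-- 	x = 0
-- 	bbest = 0
-- 	for item in bs:
-- 		x += item
-- 		if x > bbest: bbest = x
--
-- 	return max(0,rbest+bbest)
-- ===== SOURCE B (Python) =====
-- def f(rs, bs):
--     def best(xs):
--         # max prefix sum (empty prefix allowed), folded back-to-front:
--         # acc = best prefix sum of the suffix not yet consumed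
--         acc = 0
--         for x in reversed(xs):
--             acc = max(0, x + acc)
--         return acc
--     return best(rs) + best(bs)
-- ===== Notes on version B (the rewrite author's own statement) =====
-- stated objective: simpler
-- what changed: Replaces the two interleaved running-sum/running-max loops with one shared helper that folds each list back-to-front (acc = max(0, x + acc) over reversed(xs)), maintaining a single accumulator instead of a (sum, best) pair, and returns the plain sum of the two bests (both nonnegative, so A's final max(0,...) is redundant).
import Mathlib
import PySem

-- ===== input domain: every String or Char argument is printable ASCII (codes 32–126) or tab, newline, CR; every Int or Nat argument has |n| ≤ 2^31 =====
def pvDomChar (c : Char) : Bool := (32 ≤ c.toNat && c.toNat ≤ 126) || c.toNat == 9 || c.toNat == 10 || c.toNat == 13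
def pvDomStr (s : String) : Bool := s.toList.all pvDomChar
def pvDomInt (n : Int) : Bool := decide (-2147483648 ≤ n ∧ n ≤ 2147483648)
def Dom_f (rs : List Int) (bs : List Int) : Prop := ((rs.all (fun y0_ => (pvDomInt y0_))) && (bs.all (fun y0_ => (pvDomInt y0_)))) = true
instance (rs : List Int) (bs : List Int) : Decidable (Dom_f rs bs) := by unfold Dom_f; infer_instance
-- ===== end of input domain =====

-- B: one recursive helper `best xs = max 0 (head + best tail)` per list, summed; iterative over reversed(xs); same O(n+m) cost, shorter.
-- ===== PORT A =====
-- A's loop over one list: state (x, rbest), x += item; if x > rbest then rbest := x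
def fLoop (xs : List Int) (st : Int × Int) : Int × Int :=
  xs.foldl (fun p item =>
    let x := p.1 + item
    (x, if x > p.2 then x else p.2)) st

def f (rs : List Int) (bs : List Int) : Int :=
  let rbest := (fLoop rs (0, 0)).2
  let bbest := (fLoop bs (0, 0)).2
  max 0 (rbest + bbest)

-- ===== PORT B =====
-- best(xs): fold over reversed(xs); acc = best prefix sum of the suffix already seen
def fBest (xs : List Int) : Int :=
  xs.reverse.foldl (fun acc x => max 0 (x + acc)) 0

def f_alt (rs : List Int) (bs : List Int) : Int :=
  fBest rs + fBest bs

-- ===== PRECONDITION & SPEC =====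
def Spec_f (rs : List Int) (bs : List Int) (out : Int) : Prop := out = f_alt rs bs
instance (rs : List Int) (bs : List Int) (out : Int) : Decidable (Spec_f rs bs out) := by unfold Spec_f; infer_instance

-- ===== CLAIM (what is proved, stated in full; the proofs are below) =====
def Claim_equal_f : Prop := ∀ (rs : List Int) (bs : List Int), Dom_f rs bs → Spec_f rs bs (f rs bs)

-- ===== LEMMAS AND PROOFS =====

-- ===== VERDICT (by name: the statement is the Claim_ definition above) =====
lemma fBest_foldr (xs : List Int) :
    fBest xs = xs.foldr (fun x acc => max 0 (x + acc)) 0 := by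
  simp [fBest, List.foldl_reverse]

lemma fBest_nil : fBest [] = 0 := by simp [fBest]

lemma fBest_cons (x : Int) (t : List Int) : fBest (x :: t) = max 0 (x + fBest t) := by
  simp [fBest_foldr]

lemma fBest_nonneg (xs : List Int) : 0 ≤ fBest xs := by
  cases xs with
  | nil => simp [fBest_nil]
  | cons x t => simp [fBest_cons]

lemma fLoop_eq (xs : List Int) : ∀ x r : Int, x ≤ r →
    (fLoop xs (x, r)).2 = max r (x + fBest xs) := by
  induction xs with
  | nil => intro x r h; simp [fLoop, fBest_nil]; omega
  | cons a t ih =>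
    intro x r h
    have ht := fBest_nonneg t
    show (fLoop t (x + a, if x + a > r then x + a else r)).2 = _
    rw [ih (x + a) _ (by split <;> omega)]
    simp [fBest_cons]
    split <;> omega

theorem f_spec : Claim_equal_f := by
  intro rs bs _
  show f rs bs = f_alt rs bs
  unfold f f_alt
  rw [fLoop_eq rs 0 0 le_rfl, fLoop_eq bs 0 0 le_rfl]
  have hr' := fBest_nonneg rs
  have hb' := fBest_nonneg bs
  simp
  omega
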